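-- pv_equiv track=rewrite | github.com/KourtKardash/adaptive-hierarchical-histogram-thresholding | ahht.py | GetValleys
-- ===== SOURCE A (Python) =====
-- def GetValleys(H) :
--     n = len(H)
--     valleys = []
--     if H[0][0] < H[1][0] :
--         valleys.append(H[0][1])
--     if H[0][0] == H[1][0] :
--         k = 1
--         while H[0][0] == H[k][0]:
--             k += 1
--         k -= 1
--         if H[k + 1][0] > H[k][0]:
--             valleys.append(H[k // 2][1])
--     flag = True
--     i = 1
--     while i < n-1 :
--         if (H[i][0] < H[i - 1][0]) and (H[i][0] < H[i + 1][0]) :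
--             valleys.append(H[i][1])
--         elif H[i][0] < H[i - 1][0] :
--             k = 1
--             while k + i < n and H[i][0] == H[i + k][0] :
--                 k += 1
--             k -= 1
--             if k + i == n - 1 :
--                 valleys.append(H[i + k // 2][1])
--                 flag = False
--             elif H[i + k][0] < H[i + 1 + k][0] :
--                 valleys.append(H[i + k // 2][1])
--             i += k
--         i += 1
--     if flag == True and H[n - 1][0] < H[n - 2][0] :
--         valleys.append(H[n - 1][1])
--     return valleys
-- ===== SOURCE B (Python) =====
-- def GetValleys(H):
--     # Run-based rewrite: compress H into maximal runs of equal first components,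
--     # then a run is a valley iff every existing neighbouring run has a greater
--     # value; a valley run [s, e] contributes H[s + (e - s) // 2][1].
--     runs = []
--     for i, (v, _) in enumerate(H):
--         if runs and runs[-1][0] == v:
--             runs[-1] = (v, runs[-1][1], i)
--         else:
--             runs.append((v, i, i))
--     nexts = [r[0] for r in runs[1:]] + [None]
--     valleys = []
--     prev = None
--     for (v, s, e), nv in zip(runs, nexts):
--         if (prev is None or prev > v) and (nv is None or nv > v):
--             valleys.append(H[s + (e - s) // 2][1])
--         prev = v
--     return valleys
-- ===== Notes on version B (the rewrite author's own statement) =====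
-- stated objective: alternative
-- what changed: A's single index loop with in-place plateau scans and separate first/last-bin special cases is replaced by a two-phase run decomposition: compress the histogram into maximal equal-value runs, then classify a run as a valley exactly when every existing neighbouring run has a greater value, emitting the run's midpoint bin.
import Mathlib
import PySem

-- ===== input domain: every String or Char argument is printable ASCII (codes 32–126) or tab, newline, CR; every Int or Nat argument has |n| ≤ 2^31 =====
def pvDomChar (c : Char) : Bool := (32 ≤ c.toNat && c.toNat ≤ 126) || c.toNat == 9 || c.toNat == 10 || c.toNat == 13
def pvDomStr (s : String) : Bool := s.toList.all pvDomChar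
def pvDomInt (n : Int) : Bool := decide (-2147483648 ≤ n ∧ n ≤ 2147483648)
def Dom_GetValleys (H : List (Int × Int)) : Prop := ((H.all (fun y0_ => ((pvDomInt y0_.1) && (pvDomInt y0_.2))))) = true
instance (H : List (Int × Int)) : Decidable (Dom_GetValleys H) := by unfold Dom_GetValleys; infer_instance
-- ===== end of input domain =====

-- B re-implements A by compressing the histogram into runs and classifying each run
-- against its neighbouring runs (objective: alternative decomposition, same O(n) cost).

-- ===== PORT A =====
-- H[i][0] / H[i][1]; all accesses made by A inside Pre_ are in range, so pyGetD's default is never observed.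
def gA (H : List (Int × Int)) (i : Int) : Int := (PySem.List.pyGetD H i (0, 0)).1
def sA (H : List (Int × Int)) (i : Int) : Int := (PySem.List.pyGetD H i (0, 0)).2

-- `k = 1; while H[0][0] == H[k][0]: k += 1` — unbounded scan; `none` = Python's IndexError at k = len(H).
def scan0A (H : List (Int × Int)) (k : Int) : Option Int :=
  match h : PySem.List.pyGet? H k with
  | none => none
  | some p => if gA H 0 = p.1 then scan0A H (k + 1) else some k
termination_by ((H.length : Int) - k).toNat
decreasing_by
  have hin : PySem.Raise.InRange H.length k := by
    by_contra hc
    rw [← PySem.List.pyGet?_eq_none_iff] at hc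
    simp [hc] at h
  simp [PySem.Raise.InRange] at hin
  omega

-- inner `while k + i < n and H[i][0] == H[i + k][0]: k += 1`
def scanA (H : List (Int × Int)) (i k : Int) : Int :=
  if k + i < (H.length : Int) ∧ gA H i = gA H (i + k) then scanA H i (k + 1) else k
termination_by ((H.length : Int) - (k + i)).toNat
decreasing_by omega

lemma scanA_ge (H : List (Int × Int)) (i k : Int) : k ≤ scanA H i k := by
  fun_induction scanA H i k with
  | case1 k h ih => omega
  | case2 k h => omega

-- the main `while i < n - 1` loop (state: i, flag, valleys)
def loopA (H : List (Int × Int)) (i : Int) (flag : Bool) (acc : List Int) : List Int × Bool :=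
  if i < (H.length : Int) - 1 then
    if gA H i < gA H (i - 1) ∧ gA H i < gA H (i + 1) then
      loopA H (i + 1) flag (acc ++ [sA H i])
    else if gA H i < gA H (i - 1) then
      let k := scanA H i 1 - 1
      if k + i = (H.length : Int) - 1 then
        loopA H (i + k + 1) false (acc ++ [sA H (i + PySem.Int.floordiv k 2)])
      else if gA H (i + k) < gA H (i + 1 + k) then
        loopA H (i + k + 1) flag (acc ++ [sA H (i + PySem.Int.floordiv k 2)])
      else
        loopA H (i + k + 1) flag acc
    else loopA H (i + 1) flag acc
  else (acc, flag)
termination_by ((H.length : Int) - i).toNat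
decreasing_by
  · omega
  · have := scanA_ge H i 1; omega
  · have := scanA_ge H i 1; omega
  · have := scanA_ge H i 1; omega
  · omega

-- final `if flag == True and H[n-1][0] < H[n-2][0]`
def postA (H : List (Int × Int)) (p : List Int × Bool) : List Int :=
  if p.2 = true ∧ gA H ((H.length : Int) - 1) < gA H ((H.length : Int) - 2) then
    p.1 ++ [sA H ((H.length : Int) - 1)]
  else p.1

def GetValleys (H : List (Int × Int)) : List Int :=
  let valleys : List Int := []
  let valleys := if gA H 0 < gA H 1 then valleys ++ [sA H 0] else valleys
  let valleys :=
    if gA H 0 = gA H 1 then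
      match scan0A H 1 with
      | none => valleys   -- Python raises IndexError here (excluded by Pre_)
      | some k0 =>
        let k := k0 - 1
        if gA H (k + 1) > gA H k then valleys ++ [sA H (PySem.Int.floordiv k 2)] else valleys
    else valleys
  postA H (loopA H 1 true valleys)

-- ===== PORT B =====
def sB (H : List (Int × Int)) (i : Int) : Int := (PySem.List.pyGetD H i (0, 0)).2

-- one step of the run-building loop (merge into last run or start a new one)
def stepRunB (runs : List (Int × Int × Int)) (p : Int × (Int × Int)) : List (Int × Int × Int) :=
  match runs.getLast? with
  | some (vl, sl, _) =>
      if vl = p.2.1 then runs.dropLast ++ [(vl, sl, p.1)] else runs ++ [(p.2.1, p.1, p.1)]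
  | none => runs ++ [(p.2.1, p.1, p.1)]

def buildRunsB (H : List (Int × Int)) : List (Int × Int × Int) :=
  (PySem.List.enumerate H).foldl stepRunB []

-- nexts = [r[0] for r in runs[1:]] + [None]
def nextsB (runs : List (Int × Int × Int)) : List (Option Int) :=
  (runs.drop 1).map (fun r => some r.1) ++ [none]

-- one step of the classification loop (state: prev run value, valleys so far)
def stepValB (H : List (Int × Int)) (st : Option Int × List Int) (q : (Int × Int × Int) × Option Int) :
    Option Int × List Int :=
  let v := q.1.1
  let okPrev := match st.1 with | none => true | some pv => decide (pv > v)
  let okNext := match q.2 with | none => true | some nv => decide (nv > v)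
  (some v,
    if okPrev && okNext then
      st.2 ++ [sB H (q.1.2.1 + PySem.Int.floordiv (q.1.2.2 - q.1.2.1) 2)]
    else st.2)

def GetValleys_alt (H : List (Int × Int)) : List Int :=
  let runs := buildRunsB H
  ((runs.zip (nextsB runs)).foldl (stepValB H) (none, [])).2

-- ===== PRECONDITION & SPEC =====
-- A raises IndexError when len(H) < 2 (H[1]) and when all first components are equal
-- (the initial `while H[0][0] == H[k][0]` scan runs off the end); Pre_ excludes exactly those.
def Pre_GetValleys (H : List (Int × Int)) : Prop :=
  2 ≤ H.length ∧ ¬ List.IsChain (fun a b : Int × Int => a.1 = b.1) H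
instance (H : List (Int × Int)) : Decidable (Pre_GetValleys H) := by unfold Pre_GetValleys; infer_instance
def pvWitness_GetValleys : (List (Int × Int)) := ([(1, 5), (0, 6)])

def Spec_GetValleys (H : List (Int × Int)) (out : List Int) : Prop := out = GetValleys_alt H
instance (H : List (Int × Int)) (out : List Int) : Decidable (Spec_GetValleys H out) := by
  unfold Spec_GetValleys; infer_instance

-- ===== CLAIM (what is proved, stated in full; the proofs are below) =====
def Claim_equal_GetValleys : Prop :=
  ∀ (H : List (Int × Int)), Dom_GetValleys H → Pre_GetValleys H → Spec_GetValleys H (GetValleys H)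
-- ===== LEMMAS AND PROOFS =====

lemma gA_getElem (H : List (Int × Int)) (i : Int) (h0 : 0 ≤ i) (h1 : i < (H.length : Int)) :
    gA H i = (H[i.toNat]'(by omega)).1 := by
  unfold gA
  rw [PySem.List.pyGetD_eq_getElem H (0, 0) h0 h1]

-- `RSpec H lo hi runs` : `runs` is the run decomposition of indices [lo, hi) of H
-- (maximal blocks of equal first component, with their value, start and end index).
inductive RSpec (H : List (Int × Int)) : Int → Int → List (Int × Int × Int) → Prop
  | nil (lo : Int) : RSpec H lo lo []
  | cons (v s e hi : Int) (rest : List (Int × Int × Int))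
      (hse : s ≤ e) (hehi : e < hi)
      (hval : ∀ i : Int, s ≤ i → i ≤ e → gA H i = v)
      (hnext : ∀ v' s' e' rs, rest = (v', s', e') :: rs → v' ≠ v)
      (hrest : RSpec H (e + 1) hi rest) : RSpec H s hi ((v, s, e) :: rest)

lemma rspec_nil_eq {H : List (Int × Int)} {lo hi : Int} (h : RSpec H lo hi []) : lo = hi := by
  cases h; rfl

lemma rspec_empty {H : List (Int × Int)} {lo hi : Int} {R : List (Int × Int × Int)}
    (h : RSpec H lo hi R) (hle : hi ≤ lo) : R = [] := by
  cases h with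
  | nil => rfl
  | cons v s e hi rest hse hehi hval hnext hrest => omega

lemma rspec_last {H : List (Int × Int)} {lo hi : Int} {R : List (Int × Int × Int)}
    (h : RSpec H lo hi R) (hne : R ≠ []) :
    ∃ v s, R.getLast? = some (v, s, hi - 1) ∧ s ≤ hi - 1 ∧
      (∀ i : Int, s ≤ i → i ≤ hi - 1 → gA H i = v) := by
  induction h with
  | nil => exact absurd rfl hne
  | cons v s e hi rest hse hehi hval hnext hrest ih =>
    cases rest with
    | nil =>
      have he : e + 1 = hi := rspec_nil_eq hrest
      refine ⟨v, s, ?_, by omega, ?_⟩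
      · simp only [List.getLast?_singleton, Option.some.injEq, Prod.mk.injEq]
        exact ⟨trivial, trivial, by omega⟩
      · intro i h1 h2; exact hval i h1 (by omega)
    | cons r rest' =>
      obtain ⟨v', s', hls, hbound, hvals⟩ := ih (by simp)
      exact ⟨v', s', by rw [List.getLast?_cons_cons]; exact hls, hbound, hvals⟩

lemma rspec_extend {H : List (Int × Int)} {lo hi vl sl : Int} {R : List (Int × Int × Int)}
    (h : RSpec H lo hi R) :
    R.getLast? = some (vl, sl, hi - 1) → gA H hi = vl →
    RSpec H lo (hi + 1) (R.dropLast ++ [(vl, sl, hi)]) := by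
  induction h with
  | nil => intro hl _; simp at hl
  | cons v s e hi rest hse hehi hval hnext hrest ih =>
    intro hl hv
    cases rest with
    | nil =>
      have he : e + 1 = hi := rspec_nil_eq hrest
      simp only [List.getLast?_singleton, Option.some.injEq, Prod.mk.injEq] at hl
      obtain ⟨hv1, hv2, _⟩ := hl
      subst hv1; subst hv2
      simp only [List.dropLast_singleton, List.nil_append]
      refine RSpec.cons v s hi (hi + 1) [] (by omega) (by omega) ?_
        (by intro _ _ _ _ h; cases h) (RSpec.nil (hi + 1))
      intro i h1 h2
      rcases lt_or_ge i hi with hlt | hge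
      · exact hval i h1 (by omega)
      · have hieq : i = hi := by omega
        rw [hieq]; exact hv
    | cons r rest' =>
      obtain ⟨rv, rs0, re0⟩ := r
      rw [List.getLast?_cons_cons] at hl
      have hrec := ih hl hv
      rw [List.dropLast_cons_of_ne_nil (by simp), List.cons_append]
      refine RSpec.cons v s e (hi + 1) _ hse (by omega) hval ?_ hrec
      intro v' s' e' rs hEq
      cases rest' with
      | nil =>
        simp only [List.getLast?_singleton, Option.some.injEq, Prod.mk.injEq] at hl
        simp only [List.dropLast_singleton, List.nil_append, List.cons.injEq,
          Prod.mk.injEq] at hEq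
        have hvv : v' = vl := hEq.1.1.symm
        rw [hvv, ← hl.1]
        exact hnext rv rs0 re0 [] rfl
      | cons r2 rest'' =>
        rw [List.dropLast_cons_of_ne_nil (by simp), List.cons_append] at hEq
        simp only [List.cons.injEq, Prod.mk.injEq] at hEq
        rw [← hEq.1.1]
        exact hnext rv rs0 re0 _ rfl

lemma rspec_snoc {H : List (Int × Int)} {lo hi w : Int} {R : List (Int × Int × Int)}
    (h : RSpec H lo hi R) :
    (∀ v' s' e', R.getLast? = some (v', s', e') → v' ≠ w) → gA H hi = w →
    RSpec H lo (hi + 1) (R ++ [(w, hi, hi)]) := by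
  induction h with
  | nil lo0 =>
    intro _ hv
    simp only [List.nil_append]
    refine RSpec.cons w lo0 lo0 (lo0 + 1) [] le_rfl (by omega) ?_
      (by intro _ _ _ _ h; cases h) (RSpec.nil (lo0 + 1))
    intro i h1 h2
    have hieq : i = lo0 := by omega
    rw [hieq]; exact hv
  | cons v s e hi rest hse hehi hval hnext hrest ih =>
    intro hl hv
    rw [List.cons_append]
    refine RSpec.cons v s e (hi + 1) _ hse (by omega) hval ?_ ?_
    · intro v' s' e' rs hEq
      cases rest with
      | nil =>
        simp only [List.nil_append, List.cons.injEq, Prod.mk.injEq] at hEq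
        have hw : v' = w := hEq.1.1.symm
        rw [hw]
        have := hl v s e (by simp only [List.getLast?_singleton])
        exact fun hc => this hc.symm
      | cons r rest' =>
        obtain ⟨rv, rs0, re0⟩ := r
        rw [List.cons_append] at hEq
        simp only [List.cons.injEq, Prod.mk.injEq] at hEq
        rw [← hEq.1.1]
        exact hnext rv rs0 re0 _ rfl
    · refine ih ?_ hv
      intro v' s' e' hls
      cases rest with
      | nil => simp at hls
      | cons r rest' =>
        exact hl v' s' e' (by rw [List.getLast?_cons_cons]; exact hls)

lemma build_aux (H : List (Int × Int)) :
    ∀ (xs : List (Int × Int)) (t : Int) (R : List (Int × Int × Int)),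
      0 ≤ t → xs = H.drop t.toNat → RSpec H 0 t R →
      RSpec H 0 (t + xs.length) ((PySem.List.enumerate xs t).foldl stepRunB R) := by
  intro xs
  induction xs with
  | nil =>
    intro t R h0 hxs hR
    simpa [PySem.List.enumerate] using hR
  | cons x xs' ih =>
    intro t R h0 hxs hR
    have hlen : t.toNat < H.length := by
      have := congrArg List.length hxs
      simp at this
      omega
    have hx : H[t.toNat]? = some x := by
      rw [← List.head?_drop, ← hxs]
      rfl
    have hxg : H[t.toNat]'hlen = x := by
      rw [List.getElem?_eq_getElem hlen] at hx
      exact Option.some.inj hx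
    have hgt : gA H t = x.1 := by
      rw [gA_getElem H t h0 (by omega), hxg]
    have hxs' : xs' = H.drop ((t + 1).toNat) := by
      have : (t + 1).toNat = t.toNat + 1 := by omega
      rw [this, ← List.drop_drop, ← hxs]
      rfl
    have hstep : RSpec H 0 (t + 1) (stepRunB R (t, x)) := by
      rcases eq_or_lt_of_le h0 with hz | hpos
      · -- t = 0 : R must be empty, start a new run
        have hRnil : R = [] := rspec_empty hR (by omega)
        subst hRnil
        simp only [stepRunB, List.getLast?_nil, List.nil_append]
        have := rspec_snoc hR (by intro v' s' e' hc; simp at hc) hgt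
        simpa using this
      · -- t ≥ 1 : R is nonempty; merge into or append after its last run
        have hRne : R ≠ [] := by
          intro hc
          subst hc
          have := rspec_nil_eq hR
          omega
        obtain ⟨vl, sl, hlast, hb, hvals⟩ := rspec_last hR hRne
        simp only [stepRunB, hlast]
        split
        · next heq =>
          exact rspec_extend hR hlast (by rw [hgt, ← heq])
        · next hne =>
          refine rspec_snoc hR ?_ hgt
          intro v' s' e' hls
          rw [hlast] at hls
          simp only [Option.some.injEq, Prod.mk.injEq] at hls
          rw [← hls.1]
          exact hne
    have hrec := ih (t + 1) (stepRunB R (t, x)) (by omega) hxs' hstep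
    have harith : t + ((x :: xs').length : Int) = (t + 1) + (xs'.length : Int) := by
      simp
      omega
    rw [harith, PySem.List.enumerate_cons, List.foldl_cons]
    exact hrec

lemma build_spec (H : List (Int × Int)) : RSpec H 0 (H.length : Int) (buildRunsB H) := by
  have := build_aux H H 0 [] le_rfl (by simp) (RSpec.nil 0)
  simpa [buildRunsB] using this

-- recursive form of B's classification pass
def classifyR (H : List (Int × Int)) : Option Int → List (Int × Int × Int) → List Int
  | _, [] => []
  | prev, (v, s, e) :: rest =>
      (if (match prev with | none => true | some pv => decide (pv > v)) &&
          (match rest with | [] => true | (v', _, _) :: _ => decide (v' > v)) then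
        [sB H (s + PySem.Int.floordiv (e - s) 2)]
      else []) ++ classifyR H (some v) rest

lemma zipfold_eq (H : List (Int × Int)) :
    ∀ (runs : List (Int × Int × Int)) (prev : Option Int) (acc : List Int),
      ((runs.zip (nextsB runs)).foldl (stepValB H) (prev, acc)).2 = acc ++ classifyR H prev runs := by
  intro runs
  induction runs with
  | nil => intro prev acc; simp [nextsB, classifyR]
  | cons r rs ih =>
    intro prev acc
    obtain ⟨v, rs0, re0⟩ := r
    cases rs with
    | nil =>
      simp only [nextsB, List.drop_succ_cons, List.drop_nil, List.map_nil, List.nil_append,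
        List.zip_cons_cons, List.zip_nil_right, List.foldl_cons, List.foldl_nil, stepValB,
        classifyR]
      split <;> (try split) <;> simp
    | cons r2 rs' =>
      have hz : (((v, rs0, re0) :: r2 :: rs').zip (nextsB ((v, rs0, re0) :: r2 :: rs'))) =
          ((v, rs0, re0), some r2.1) :: ((r2 :: rs').zip (nextsB (r2 :: rs'))) := by
        simp [nextsB]
      rw [hz, List.foldl_cons]
      have hstep : stepValB H (prev, acc) ((v, rs0, re0), some r2.1) =
          (some v,
            if (match prev with | none => true | some pv => decide (pv > v)) &&
               decide (r2.1 > v) then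
              acc ++ [sB H (rs0 + PySem.Int.floordiv (re0 - rs0) 2)]
            else acc) := by
        rfl
      rw [hstep, ih]
      obtain ⟨v2, s2, e2⟩ := r2
      simp only [classifyR]
      split <;> (try split) <;> simp
lemma alt_eq_classify (H : List (Int × Int)) :
    GetValleys_alt H = classifyR H none (buildRunsB H) := by
  unfold GetValleys_alt
  rw [zipfold_eq]
  simp

lemma scanA_eq (H : List (Int × Int)) (v i e : Int) (hie : i ≤ e) (heN : e ≤ (H.length : Int) - 1)
    (hv : ∀ j : Int, i ≤ j → j ≤ e → gA H j = v)
    (hnx : e = (H.length : Int) - 1 ∨ gA H (e + 1) ≠ v) :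
    ∀ k, 1 ≤ k → i + k ≤ e + 1 → scanA H i k = e + 1 - i := by
  suffices hgen : ∀ m : ℕ, ∀ k, (e + 1 - i - k).toNat = m → 1 ≤ k → i + k ≤ e + 1 → scanA H i k = e + 1 - i by
    intro k hk1 hk2
    exact hgen _ k rfl hk1 hk2
  intro m
  induction m using Nat.strong_induction_on with
  | _ m IH =>
    intro k hm hk1 hk2
    rw [scanA]
    by_cases hik : i + k ≤ e
    · rw [if_pos ⟨by omega, by rw [hv i le_rfl hie, hv (i + k) (by omega) (by omega)]⟩]
      exact IH (e + 1 - i - (k + 1)).toNat (by omega) (k + 1) rfl (by omega) (by omega)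
    · have hke : i + k = e + 1 := by omega
      rw [if_neg]
      · omega
      · rintro ⟨c1, c2⟩
        rcases hnx with hN | hne
        · omega
        · rw [hv i le_rfl hie, show i + k = e + 1 by omega] at c2
          exact hne c2.symm

lemma scan0_eq (H : List (Int × Int)) (v e : Int) (h0e : 0 ≤ e) (heN : e + 1 < (H.length : Int))
    (hv : ∀ j : Int, 0 ≤ j → j ≤ e → gA H j = v) (hnx : gA H (e + 1) ≠ v) :
    ∀ k, 1 ≤ k → k ≤ e + 1 → scan0A H k = some (e + 1) := by
  suffices hgen : ∀ m : ℕ, ∀ k, (e + 1 - k).toNat = m → 1 ≤ k → k ≤ e + 1 → scan0A H k = some (e + 1) by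
    intro k hk1 hk2
    exact hgen _ k rfl hk1 hk2
  intro m
  induction m using Nat.strong_induction_on with
  | _ m IH =>
    intro k hm hk1 hk2
    have hkr : PySem.List.pyGet? H k = some (H[k.toNat]'(by omega)) := by
      exact PySem.List.pyGet?_eq_some_getElem H (show (0:Int) ≤ k by omega) (by omega)
    rw [scan0A]
    split
    · next heq =>
      rw [hkr] at heq
      cases heq
    · next p heq =>
      rw [hkr] at heq
      have hp : p = H[k.toNat]'(by omega) := (Option.some.inj heq).symm
      have hg : p.1 = gA H k := by
        rw [hp, ← gA_getElem H k (by omega) (by omega)]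
      by_cases hke : k ≤ e
      · rw [if_pos (by rw [hg, hv 0 le_rfl h0e, hv k (by omega) hke])]
        exact IH (e + 1 - (k + 1)).toNat (by omega) (k + 1) rfl (by omega) (by omega)
      · have hke1 : k = e + 1 := by omega
        rw [if_neg]
        · rw [hke1]
        · rw [hg, hv 0 le_rfl h0e, hke1]
          exact fun hc => hnx hc.symm

lemma walkA (H : List (Int × Int)) (e : Int) (heN : e ≤ (H.length : Int) - 1) :
    ∀ (t : Int) (flag : Bool) (acc : List Int), 1 ≤ t → t ≤ e + 1 →
      (∀ i : Int, t ≤ i → i ≤ e → ¬ (gA H i < gA H (i - 1))) →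
      loopA H t flag acc = loopA H (e + 1) flag acc := by
  suffices hgen : ∀ m : ℕ, ∀ t (flag : Bool) (acc : List Int), (e + 1 - t).toNat = m → 1 ≤ t → t ≤ e + 1 →
      (∀ i : Int, t ≤ i → i ≤ e → ¬ (gA H i < gA H (i - 1))) →
      loopA H t flag acc = loopA H (e + 1) flag acc by
    intro t flag acc h1 h2 h3
    exact hgen _ t flag acc rfl h1 h2 h3
  intro m
  induction m using Nat.strong_induction_on with
  | _ m IH =>
    intro t flag acc hm h1 h2 hno
    rcases eq_or_lt_of_le h2 with hte | hlt
    · rw [hte]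
    · have hte : t ≤ e := by omega
      by_cases htN : t < (H.length : Int) - 1
      · rw [loopA, if_pos htN, if_neg (fun hc => hno t le_rfl hte hc.1),
          if_neg (hno t le_rfl hte)]
        exact IH (e + 1 - (t + 1)).toNat (by omega) (t + 1) flag acc rfl (by omega) (by omega)
          (fun i hi1 hi2 => hno i (by omega) hi2)
      · have hteq : t = e := by omega
        have heq1 : e + 1 = (H.length : Int) := by omega
        rw [loopA, if_neg htN, loopA, if_neg (by omega)]
lemma rspec_head {H : List (Int × Int)} {lo hi v s e : Int} {rs : List (Int × Int × Int)}
    (h : RSpec H lo hi ((v, s, e) :: rs)) :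
    s = lo ∧ s ≤ e ∧ e < hi ∧ (∀ i : Int, s ≤ i → i ≤ e → gA H i = v) ∧
      (∀ v' s' e' rs', rs = (v', s', e') :: rs' → v' ≠ v) ∧ RSpec H (e + 1) hi rs := by
  cases h with
  | cons _ _ _ _ _ hse hehi hval hnext hrest => exact ⟨rfl, hse, hehi, hval, hnext, hrest⟩

lemma sAB (H : List (Int × Int)) (i : Int) : sA H i = sB H i := rfl

lemma postA_false (H : List (Int × Int)) (vs : List Int) : postA H (vs, false) = vs := by
  simp [postA]

lemma postA_true_pos (H : List (Int × Int)) (vs : List Int)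
    (hc : gA H ((H.length : Int) - 1) < gA H ((H.length : Int) - 2)) :
    postA H (vs, true) = vs ++ [sA H ((H.length : Int) - 1)] := by
  simp [postA, hc]

lemma postA_true_neg (H : List (Int × Int)) (vs : List Int)
    (hc : ¬ gA H ((H.length : Int) - 1) < gA H ((H.length : Int) - 2)) :
    postA H (vs, true) = vs := by
  simp [postA, hc]

lemma loop_correct (H : List (Int × Int)) :
    ∀ (runs : List (Int × Int × Int)) (s hi : Int), RSpec H s hi runs → hi = (H.length : Int) →
      ∀ (pv : Int) (acc : List Int), 1 ≤ s → s ≤ (H.length : Int) - 1 → gA H (s - 1) = pv →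
        (∀ v s' e rs, runs = (v, s', e) :: rs → pv ≠ v) →
        postA H (loopA H s true acc) = acc ++ classifyR H (some pv) runs := by
  intro runs s hi h
  induction h with
  | nil lo0 =>
    intro hN pv acc h1 h2 h3 h4
    exact absurd h2 (by omega)
  | cons v s e hi rest hse hehi hval hnext hrest ih =>
    intro hN pv acc h1 h2 h3 hhd
    subst hN
    have hpvv : pv ≠ v := hhd v s e rest rfl
    have hgs : gA H s = v := hval s le_rfl hse
    cases rest with
    | nil =>
      -- last run of the histogram
      have heN : e + 1 = (H.length : Int) := rspec_nil_eq hrest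
      rcases lt_trichotomy pv v with hlt | heq | hgt
      · -- entered ascending: no valley, and the final check does not fire
        have hwalk : loopA H s true acc = loopA H (e + 1) true acc := by
          refine walkA H e (by omega) s true acc h1 (by omega) ?_
          intro i hi1 hi2
          rcases eq_or_lt_of_le hi1 with hieq | hilt
          · rw [← hieq, hgs, h3]; omega
          · rw [hval i hi1 hi2, hval (i - 1) (by omega) (by omega)]; omega
        rw [hwalk, loopA, if_neg (by omega), postA_true_neg]
        · simp [classifyR, show ¬ (pv > v) by omega]
        · intro hc
          rw [show (H.length : Int) - 1 = e by omega] at hc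
          rcases eq_or_lt_of_le hse with hseq | hslt
          · rw [show (H.length : Int) - 2 = s - 1 by omega, h3, hval e hse le_rfl] at hc
            omega
          · rw [hval e hse le_rfl, hval ((H.length : Int) - 2) (by omega) (by omega)] at hc
            omega
      · exact absurd heq hpvv
      · -- entered descending: the trailing run is a valley
        by_cases hse' : s = e
        · -- run of length 1 at the very end: appended by the final check
          rw [loopA, if_neg (by omega),
            postA_true_pos H acc (by rw [show (H.length : Int) - 1 = s by omega,
              show (H.length : Int) - 2 = s - 1 by omega, hgs, h3]; omega)]
          simp only [classifyR, show (decide (pv > v) && true) = true by simp; omega]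
          rw [show (H.length : Int) - 1 = s by omega, sAB]
          rw [show e - s = 0 by omega, show PySem.Int.floordiv 0 2 = 0 by decide]
          simp
        · -- plateau reaching the end: appended inside the loop, flag := false
          have hslt : s < e := lt_of_le_of_ne hse hse'
          rw [loopA, if_pos (by omega),
            if_neg (by rintro ⟨-, hc⟩; rw [hgs, hval (s + 1) (by omega) (by omega)] at hc; omega),
            if_pos (by rw [hgs, h3]; omega)]
          have hscan : scanA H s 1 = e + 1 - s :=
            scanA_eq H v s e hse (by omega) hval (Or.inl (by omega)) 1 le_rfl (by omega)
          simp only [hscan]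
          rw [if_pos (show e + 1 - s - 1 + s = (H.length : Int) - 1 by omega),
            show s + (e + 1 - s - 1) + 1 = (H.length : Int) by omega,
            loopA, if_neg (by omega), postA_false]
          simp only [classifyR, show (decide (pv > v) && true) = true by simp; omega]
          rw [show e + 1 - s - 1 = e - s by omega, sAB]
          simp
    | cons r2 rest' =>
      obtain ⟨v2, s2, e2⟩ := r2
      obtain ⟨hs2, hs2e2, he2N, hval2, hnext2, hrest2⟩ := rspec_head hrest
      have hv2 : gA H (e + 1) = v2 := by rw [show e + 1 = s2 from hs2.symm] at *; exact hval2 s2 le_rfl hs2e2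
      have hv2v : v2 ≠ v := hnext v2 s2 e2 rest' rfl
      have he1N : e + 1 ≤ (H.length : Int) - 1 := by omega
      have hIH : ∀ acc', postA H (loopA H (e + 1) true acc') = acc' ++ classifyR H (some v) ((v2, s2, e2) :: rest') := by
        intro acc'
        exact ih rfl v acc' (by omega) he1N (by rw [show e + 1 - 1 = e by omega]; exact hval e hse le_rfl)
          (fun v' s' e' rs' hEq => by
            have : v' = v2 := by
              simp only [List.cons.injEq, Prod.mk.injEq] at hEq
              exact hEq.1.1.symm
            rw [this]; exact fun hc => hv2v hc.symm)
      rcases lt_trichotomy pv v with hlt | heq | hgt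
      · -- entered ascending: walk through the run, nothing to record
        have hwalk : loopA H s true acc = loopA H (e + 1) true acc := by
          refine walkA H e (by omega) s true acc h1 (by omega) ?_
          intro i hi1 hi2
          rcases eq_or_lt_of_le hi1 with hieq | hilt
          · rw [← hieq, hgs, h3]; omega
          · rw [hval i hi1 hi2, hval (i - 1) (by omega) (by omega)]; omega
        rw [hwalk, hIH acc]
        simp [classifyR, show ¬ (pv > v) by omega]
      · exact absurd heq hpvv
      · -- entered descending
        by_cases hse' : s = e
        · -- run of length one
          by_cases hvv2 : v < v2
          · -- strict local minimum
            rw [loopA, if_pos (by omega),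
              if_pos ⟨by rw [hgs, h3]; omega,
                by rw [hgs, show s + 1 = e + 1 by omega, hv2]; omega⟩,
              show s + 1 = e + 1 by omega, hIH]
            simp only [classifyR,
              show (decide (pv > v) && decide (v2 > v)) = true by simp; omega]
            rw [sAB, show e - s = 0 by omega, show PySem.Int.floordiv 0 2 = 0 by decide]
            simp
          · -- descending step (next run lower): nothing recorded here
            rw [loopA, if_pos (by omega),
              if_neg (by rintro ⟨-, hc⟩; rw [hgs, show s + 1 = e + 1 by omega, hv2] at hc; omega),
              if_pos (by rw [hgs, h3]; omega)]
            have hscan : scanA H s 1 = e + 1 - s :=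
              scanA_eq H v s e hse (by omega) hval
                (Or.inr (by rw [hv2]; exact fun hc => hv2v hc)) 1 le_rfl (by omega)
            simp only [hscan]
            rw [if_neg (show ¬ (e + 1 - s - 1 + s = (H.length : Int) - 1) by omega),
              if_neg (by rw [show s + (e + 1 - s - 1) = e by omega,
                show s + 1 + (e + 1 - s - 1) = e + 1 by omega, hval e hse le_rfl, hv2]; omega),
              show s + (e + 1 - s - 1) + 1 = e + 1 by omega, hIH]
            simp [classifyR, show ¬ (v2 > v) by omega]
        · -- plateau run in the middle
          have hslt : s < e := lt_of_le_of_ne hse hse'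
          rw [loopA, if_pos (by omega),
            if_neg (by rintro ⟨-, hc⟩; rw [hgs, hval (s + 1) (by omega) (by omega)] at hc; omega),
            if_pos (by rw [hgs, h3]; omega)]
          have hscan : scanA H s 1 = e + 1 - s :=
            scanA_eq H v s e hse (by omega) hval
              (Or.inr (by rw [hv2]; exact fun hc => hv2v hc)) 1 le_rfl (by omega)
          simp only [hscan]
          rw [if_neg (show ¬ (e + 1 - s - 1 + s = (H.length : Int) - 1) by omega)]
          by_cases hvv2 : v < v2
          · rw [if_pos (by rw [show s + (e + 1 - s - 1) = e by omega,
                show s + 1 + (e + 1 - s - 1) = e + 1 by omega, hval e hse le_rfl, hv2]; omega),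
              show s + (e + 1 - s - 1) + 1 = e + 1 by omega, hIH]
            simp only [classifyR,
              show (decide (pv > v) && decide (v2 > v)) = true by simp; omega]
            rw [sAB, show e + 1 - s - 1 = e - s by omega]
            simp
          · rw [if_neg (by rw [show s + (e + 1 - s - 1) = e by omega,
                show s + 1 + (e + 1 - s - 1) = e + 1 by omega, hval e hse le_rfl, hv2]; omega),
              show s + (e + 1 - s - 1) + 1 = e + 1 by omega, hIH]
            simp [classifyR, show ¬ (v2 > v) by omega]

-- ===== VERDICT (by name: the statement is the Claim_ definition above) =====
lemma classifyR_cons (H : List (Int × Int)) (prev : Option Int) (v se ee : Int)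
    (rs : List (Int × Int × Int)) :
    classifyR H prev ((v, se, ee) :: rs) =
      (if (match prev with | none => true | some pv => decide (pv > v)) &&
          (match rs with | [] => true | (v', _, _) :: _ => decide (v' > v)) then
        [sB H (se + PySem.Int.floordiv (ee - se) 2)]
      else []) ++ classifyR H (some v) rs := rfl

lemma all_equal_chain (H : List (Int × Int)) (v : Int)
    (hv : ∀ i : Int, 0 ≤ i → i ≤ (H.length : Int) - 1 → gA H i = v) :
    List.IsChain (fun a b : Int × Int => a.1 = b.1) H := by
  have key : ∀ (j : Nat) (hj : j < H.length), (H[j]'hj).1 = v := by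
    intro j hj
    have h := hv (j : Int) (by omega) (by omega)
    rw [gA_getElem H (j : Int) (by omega) (by omega)] at h
    simpa using h
  rw [List.isChain_iff_getElem]
  intro i hi
  rw [key i (by omega), key (i + 1) hi]

-- ===== VERDICT (by name: the statement is the Claim_ definition above) =====
theorem GetValleys_spec : Claim_equal_GetValleys := by
  unfold Claim_equal_GetValleys
  intro H _ hp
  unfold Spec_GetValleys
  obtain ⟨hlen, hch⟩ := hp
  rw [alt_eq_classify]
  have hR := build_spec H
  rcases hEq : buildRunsB H with - | ⟨⟨v0, s0, e0⟩, rest0⟩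
  · rw [hEq] at hR
    have := rspec_nil_eq hR
    omega
  · rw [hEq] at hR
    obtain ⟨hs0, hs0e0, he0N, hval0, hnext0, hrest0⟩ := rspec_head hR
    subst hs0
    have hg0 : gA H 0 = v0 := hval0 0 le_rfl hs0e0
    cases rest0 with
    | nil =>
      -- a single run would mean all first components equal, excluded by Pre_
      have heN : e0 + 1 = (H.length : Int) := rspec_nil_eq hrest0
      exact absurd (all_equal_chain H v0 (fun i h1 h2 => hval0 i h1 (by omega))) hch
    | cons r1 rest1 =>
      obtain ⟨v1, s1, e1⟩ := r1
      obtain ⟨hs1, hs1e1, he1N, hval1, hnext1, hrest1⟩ := rspec_head hrest0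
      subst hs1
      have hv1v0 : v1 ≠ v0 := hnext0 v1 (e0 + 1) e1 rest1 rfl
      have hgs1 : gA H (e0 + 1) = v1 := hval1 (e0 + 1) le_rfl hs1e1
      have hge0 : gA H e0 = v0 := hval0 e0 hs0e0 le_rfl
      have hloop : ∀ acc, postA H (loopA H (e0 + 1) true acc) =
          acc ++ classifyR H (some v0) ((v1, e0 + 1, e1) :: rest1) := by
        intro acc
        refine loop_correct H ((v1, e0 + 1, e1) :: rest1) (e0 + 1) (H.length : Int)
          hrest0 rfl v0 acc (by omega) (by omega)
          (by rw [show e0 + 1 - 1 = e0 by omega]; exact hge0) ?_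
        intro v' s' e' rs' hEq'
        simp only [List.cons.injEq, Prod.mk.injEq] at hEq'
        rw [← hEq'.1.1]
        exact fun hc => hv1v0 hc.symm
      rw [GetValleys]
      rw [classifyR_cons H none v0 0 e0 ((v1, e0 + 1, e1) :: rest1)]
      rcases eq_or_lt_of_le hs0e0 with he00 | he0pos
      · -- first run has length 1
        have hg1 : gA H 1 = v1 := by
          rw [show (1 : Int) = e0 + 1 by omega]
          exact hgs1
        rw [if_neg (show ¬ gA H 0 = gA H 1 by rw [hg0, hg1]; exact fun hc => hv1v0 hc.symm)]
        by_cases hlt : v0 < v1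
        · rw [if_pos (by rw [hg0, hg1]; exact hlt)]
          simp only [List.nil_append]
          conv_lhs => rw [show (1 : Int) = e0 + 1 by omega]
          rw [hloop, sAB]
          rw [show e0 - 0 = e0 by omega, ← he00, show PySem.Int.floordiv 0 2 = 0 by decide]
          simp [hlt]
        · rw [if_neg (by rw [hg0, hg1]; exact hlt)]
          conv_lhs => rw [show (1 : Int) = e0 + 1 by omega]
          rw [hloop]
          simp [hlt]
      · -- first run is a plateau of length ≥ 2
        have hg1 : gA H 1 = v0 := hval0 1 (by omega) (by omega)
        rw [if_neg (show ¬ gA H 0 < gA H 1 by rw [hg0, hg1]; omega),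
          if_pos (show gA H 0 = gA H 1 by rw [hg0, hg1])]
        have hscan : scan0A H 1 = some (e0 + 1) := by
          refine scan0_eq H v0 e0 (by omega) (by omega) hval0 ?_ 1 le_rfl (by omega)
          rw [hgs1]
          exact fun hc => hv1v0 hc
        rw [hscan]
        simp only [List.nil_append]
        have hwalk : ∀ acc, loopA H 1 true acc = loopA H (e0 + 1) true acc := by
          intro acc
          refine walkA H e0 (by omega) 1 true acc le_rfl (by omega) ?_
          intro i hi1 hi2
          rw [hval0 i (by omega) hi2, hval0 (i - 1) (by omega) (by omega)]
          omega
        have hge01 : gA H (e0 + 1 - 1 + 1) = v1 := by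
          rw [show e0 + 1 - 1 + 1 = e0 + 1 by omega]
          exact hgs1
        have hge00 : gA H (e0 + 1 - 1) = v0 := by
          rw [show e0 + 1 - 1 = e0 by omega]
          exact hge0
        by_cases hlt : v0 < v1
        · rw [if_pos (show gA H (e0 + 1 - 1 + 1) > gA H (e0 + 1 - 1) by
            rw [hge01, hge00]; exact hlt)]
          rw [hwalk, hloop, sAB]
          rw [show e0 + 1 - 1 = e0 by omega, show e0 - 0 = e0 by omega]
          simp [hlt]
        · rw [if_neg (show ¬ gA H (e0 + 1 - 1 + 1) > gA H (e0 + 1 - 1) by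
            rw [hge01, hge00]; exact hlt)]
          rw [hwalk, hloop]
          simp [hlt]
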